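-- pv_equiv track=rewrite | github.com/abhi776060/test | 08-02-2022/problem/utopian.py | utopian
-- ===== SOURCE A (Python) =====
-- def utopian(n):
--     growth=[]
--     first=1
--     second=2
--     for x in range(0,n+1,2):
--         growth.append(first)
--         growth.append(second)
--         first=second+1
--         second=first*2
--     return(growth[n])
-- ===== SOURCE B (Python) =====
-- def utopian(n):
--     # Closed form: the tree's height after n cycles is 2^(n//2+1)-1 after a
--     # spring (even n) and twice that, 2^(n//2+2)-2, after a monsoon (odd n).
--     k = n // 2
--     if n % 2:
--         return 2 ** (k + 2) - 2
--     return 2 ** (k + 1) - 1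
-- ===== Notes on version B (the rewrite author's own statement) =====
-- stated objective: faster
-- what changed: Replaces the loop that materialises the whole growth list with a parity-based closed form 2^(n//2+1)-1 (even n) / 2^(n//2+2)-2 (odd n).
import Mathlib
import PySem

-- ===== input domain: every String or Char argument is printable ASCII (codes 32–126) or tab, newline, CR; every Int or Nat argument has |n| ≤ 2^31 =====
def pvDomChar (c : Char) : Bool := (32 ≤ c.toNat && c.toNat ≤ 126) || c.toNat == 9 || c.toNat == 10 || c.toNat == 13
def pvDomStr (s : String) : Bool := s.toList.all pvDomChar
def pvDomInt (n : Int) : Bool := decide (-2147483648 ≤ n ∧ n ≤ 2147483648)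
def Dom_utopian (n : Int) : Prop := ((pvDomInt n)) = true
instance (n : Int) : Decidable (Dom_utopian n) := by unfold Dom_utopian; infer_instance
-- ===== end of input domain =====

-- B replaces A's list-building loop with a parity-based closed form (O(1) vs O(n)).

-- ===== PORT A =====
-- one loop body: append first; append second; first = second + 1; second = first * 2
def utopianStep (s : List Int × Int × Int) : List Int × Int × Int :=
  (s.1 ++ [s.2.1] ++ [s.2.2], s.2.2 + 1, (s.2.2 + 1) * 2)

def utopian (n : Int) : Int :=
  let r := (PySem.List.pyRange 0 (n + 1) 2).foldl (fun s _ => utopianStep s) ([], 1, 2)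
  -- growth[n]: Python raises IndexError out of range; Pre_utopian keeps n in range
  PySem.List.pyGetD r.1 n 0

-- ===== PORT B =====
-- 2 ** e with e = k+2 resp. k+1; under Pre_utopian (0 ≤ n) the exponent is
-- nonnegative, so the .toNat on the exponent is exact.
def utopian_alt (n : Int) : Int :=
  if PySem.Int.mod n 2 ≠ 0 then 2 ^ (PySem.Int.floordiv n 2 + 2).toNat - 2
  else 2 ^ (PySem.Int.floordiv n 2 + 1).toNat - 1

-- ===== PRECONDITION & SPEC =====
-- For n < 0 the loop runs zero times and growth[n] raises IndexError.
def Pre_utopian (n : Int) : Prop := 0 ≤ n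
instance (n : Int) : Decidable (Pre_utopian n) := by unfold Pre_utopian; infer_instance
def pvWitness_utopian : Int := (5)

def Spec_utopian (n : Int) (out : Int) : Prop := out = utopian_alt n
instance (n : Int) (out : Int) : Decidable (Spec_utopian n out) := by unfold Spec_utopian; infer_instance

-- ===== CLAIM (what is proved, stated in full; the proofs are below) =====
def Claim_equal_utopian : Prop := ∀ (n : Int), Dom_utopian n → Pre_utopian n → Spec_utopian n (utopian n)

-- ===== LEMMAS AND PROOFS =====

-- A's loop ignores the loop variable, so it is iteration of utopianStep.
def uIter : Nat → (List Int × Int × Int) → (List Int × Int × Int)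
  | 0, s => s
  | j + 1, s => uIter j (utopianStep s)

theorem foldl_eq_uIter (l : List Int) (s : List Int × Int × Int) :
    l.foldl (fun s _ => utopianStep s) s = uIter l.length s := by
  induction l generalizing s with
  | nil => rfl
  | cons a t ih => simp [List.foldl, uIter, ih]

theorem uIter_succ' (j : Nat) (s : List Int × Int × Int) :
    uIter (j + 1) s = utopianStep (uIter j s) := by
  induction j generalizing s with
  | zero => rfl
  | succ j ih => simp only [uIter]; rw [← ih]; rfl

-- the growth list after j iterations
def uGl (j : Nat) : List Int :=
  (List.range j).flatMap (fun i => [2 ^ (i + 1) - (1 : Int), 2 ^ (i + 2) - 2])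

theorem uIter_closed (j : Nat) :
    uIter j ([], 1, 2) = (uGl j, 2 ^ (j + 1) - 1, 2 ^ (j + 2) - 2) := by
  induction j with
  | zero => simp [uIter, uGl]
  | succ j ih =>
      rw [uIter_succ', ih]
      simp [utopianStep, uGl, List.range_succ]
      constructor
      · ring
      · ring

theorem uGl_length (j : Nat) : (uGl j).length = 2 * j := by
  induction j with
  | zero => rfl
  | succ j ih => simp [uGl, List.range_succ] at ih ⊢; omega

theorem uGl_get (j N : Nat) (h : N < 2 * j) :
    (uGl j)[N]? = some (if N % 2 = 0 then 2 ^ (N / 2 + 1) - (1 : Int) else 2 ^ (N / 2 + 2) - 2) := by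
  induction j with
  | zero => omega
  | succ j ih =>
      have e : uGl (j + 1) = uGl j ++ [2 ^ (j + 1) - (1 : Int), 2 ^ (j + 2) - 2] := by
        simp [uGl, List.range_succ]
      by_cases hN : N < 2 * j
      · rw [e, List.getElem?_append_left (by rw [uGl_length]; exact hN)]
        exact ih hN
      · have hl : (uGl j).length = 2 * j := uGl_length j
        rcases (by omega : N = 2 * j ∨ N = 2 * j + 1) with rfl | rfl
        · rw [e, List.getElem?_append_right (by omega)]
          have h2 : 2 * j % 2 = 0 := by omega
          have h3 : 2 * j / 2 = j := by omega
          simp [hl, h2, h3]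
        · rw [e, List.getElem?_append_right (by omega)]
          have h2 : (2 * j + 1) % 2 = 1 := by omega
          have h3 : (2 * j + 1) / 2 = j := by omega
          simp [hl, h2, h3]

-- ===== VERDICT (by name: the statement is the Claim_ definition above) =====
theorem utopian_spec : Claim_equal_utopian := by
  intro n _ hpre
  unfold Spec_utopian
  unfold Pre_utopian at hpre
  obtain ⟨N, rfl⟩ : ∃ N : Nat, n = (N : Int) := ⟨n.toNat, by omega⟩
  -- length of range(0, n+1, 2)
  have hlen : (PySem.List.pyRange 0 ((N : Int) + 1) 2).length = N / 2 + 1 := by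
    rw [PySem.List.pyRange_of_pos 0 ((N : Int) + 1) (by norm_num)]
    rw [List.length_map, List.length_range]
    rw [if_pos (by omega : (0 : Int) < (N : Int) + 1)]
    omega
  -- A's side
  have hA : utopian (N : Int)
      = (if N % 2 = 0 then 2 ^ (N / 2 + 1) - (1 : Int) else 2 ^ (N / 2 + 2) - 2) := by
    unfold utopian
    rw [foldl_eq_uIter, hlen, uIter_closed]
    simp only [PySem.List.pyGetD_natCast]
    have := uGl_get (N / 2 + 1) N (by omega)
    simp [List.getD, this]
  -- B's side
  have hB : utopian_alt (N : Int)
      = (if N % 2 = 0 then 2 ^ (N / 2 + 1) - (1 : Int) else 2 ^ (N / 2 + 2) - 2) := by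
    unfold utopian_alt
    have hfd : PySem.Int.floordiv (N : Int) 2 = ((N / 2 : Nat) : Int) := by
      simp [PySem.Int.floordiv, Int.fdiv_eq_ediv]
    have hmd : PySem.Int.mod (N : Int) 2 = ((N % 2 : Nat) : Int) := by
      simp [PySem.Int.mod, Int.fmod_eq_emod]
    rw [hfd, hmd]
    have h1 : (((N / 2 : Nat) : Int) + 1).toNat = N / 2 + 1 := by omega
    have h2 : (((N / 2 : Nat) : Int) + 2).toNat = N / 2 + 2 := by omega
    rw [h1, h2]
    by_cases hp : N % 2 = 0
    · simp [hp]
    · have : N % 2 = 1 := by omega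
      simp [this]
  rw [hA, hB]
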